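-- pv_equiv track=rewrite | github.com/Wizmann/ACM-ICPC | Leetcode/Algorithm/python/01898-Maximum Number of Removable Characters.py | issubstr
-- ===== SOURCE A (Python) =====
-- def issubstr(a, b, removed):
--     st = set(removed)
--
--     n = len(a)
--     m = len(b)
--     p, q = 0, 0
--     while p < n and q < m:
--         while p in st:
--             p += 1
--         if p >= n:
--             break
--         if a[p] == b[q]:
--             p += 1
--             q += 1
--         else:
--             p += 1
--     return q == m
-- ===== SOURCE B (Python) =====
-- def issubstr(a, b, removed):
--     st = set(removed)
--     f = [a[i] for i in range(len(a)) if i not in st]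
--     # occurrence index: char -> increasing list of its positions in f
--     pos = {}
--     for k, ch in enumerate(f):
--         pos.setdefault(ch, []).append(k)
--     cur = 0
--     for ch in b:
--         lst = pos.get(ch, [])
--         lo, hi = 0, len(lst)
--         while lo < hi:  # binary search: first position >= cur
--             mid = (lo + hi) // 2
--             if lst[mid] < cur:
--                 lo = mid + 1
--             else:
--                 hi = mid
--         if lo == len(lst):
--             return False
--         cur = lst[lo] + 1
--     return True
-- ===== Notes on version B (the rewrite author's own statement) =====
-- stated objective: alternative
-- what changed: Replaces A's single greedy two-pointer scan (with an inline skip-over-removed loop) by an index-based algorithm: build a char->positions occurrence dictionary of the kept characters once, then match each character of b by binary-searching its occurrence list for the first position past the previous match.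
import Mathlib
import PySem

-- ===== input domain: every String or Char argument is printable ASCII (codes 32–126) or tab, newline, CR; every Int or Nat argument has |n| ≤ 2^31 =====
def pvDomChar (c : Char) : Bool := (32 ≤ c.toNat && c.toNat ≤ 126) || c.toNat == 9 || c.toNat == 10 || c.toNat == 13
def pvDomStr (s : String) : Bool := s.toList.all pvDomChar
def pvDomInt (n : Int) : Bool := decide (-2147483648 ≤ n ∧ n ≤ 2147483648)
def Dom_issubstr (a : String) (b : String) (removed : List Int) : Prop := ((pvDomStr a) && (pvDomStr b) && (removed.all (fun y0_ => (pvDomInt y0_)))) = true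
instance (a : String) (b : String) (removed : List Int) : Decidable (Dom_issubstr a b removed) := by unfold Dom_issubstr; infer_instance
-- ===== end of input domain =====

-- B replaces A's greedy two-pointer scan by an occurrence-index algorithm: build a
-- char→positions dictionary of the kept characters once, then binary-search each
-- character of b for its first position past the previous match; objective: alternative.

-- ===== PORT A =====
-- `while p in st: p += 1` (fuel only makes the recursion structural: st.length steps
-- always suffice, since each skipped index is a distinct member of st)
def skipA (st : List Int) : Nat → Int → Int
  | 0, p => p
  | fuel + 1, p => if st.contains p then skipA st fuel (p + 1) else p

-- the outer while loop of A (fuel only makes the recursion structural: p grows by ≥ 1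
-- per iteration, so n.toNat + 1 steps always suffice)
def loopA (a b : String) (st : List Int) (n m : Int) : Nat → Int → Int → Bool
  | 0, _, q => decide (q = m)
  | fuel + 1, p, q =>
    if p < n ∧ q < m then
      let p' := skipA st st.length p
      if p' ≥ n then decide (q = m)
      else if PySem.Str.pyGet? a p' == PySem.Str.pyGet? b q then
        loopA a b st n m fuel (p' + 1) (q + 1)
      else
        loopA a b st n m fuel (p' + 1) q
    else decide (q = m)

def issubstr (a : String) (b : String) (removed : List Int) : Bool :=
  let st := PySem.Set.ofList removed
  let n := PySem.Str.len a
  let m := PySem.Str.len b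
  loopA a b st n m (n.toNat + 1) 0 0

-- ===== PORT B =====
-- `for k, ch in enumerate(f): pos.setdefault(ch, []).append(k)`
-- (setdefault+append rebinds pos[ch] to pos.get(ch, []) + [k])
def buildPos (f : List Char) : PySem.Dict Char (List Int) :=
  (PySem.List.enumerate f).foldl
    (fun d kc => d.insert kc.2 (d.getD kc.2 [] ++ [kc.1])) PySem.Dict.empty

-- the `while lo < hi` binary-search loop; `lst[mid]` is ported as pyGetD, exact here
-- because 0 ≤ lo ≤ mid < hi ≤ len(lst) holds at every evaluated access
def bsearch (lst : List Int) (cur : Int) (lo hi : Int) : Int :=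
  if h : lo < hi then
    let mid := PySem.Int.floordiv (lo + hi) 2
    if PySem.List.pyGetD lst mid 0 < cur then bsearch lst cur (mid + 1) hi
    else bsearch lst cur lo mid
  else lo
termination_by (hi - lo).toNat
decreasing_by
  · have := PySem.Int.floordiv_two_mid_bounds (lo := lo) (hi := hi) (le_of_lt h)
    omega
  · have h1 := PySem.Int.floordiv_two_mid_bounds (lo := lo) (hi := hi) (le_of_lt h)
    have h2 : PySem.Int.floordiv (lo + hi) 2 < hi :=
      (PySem.Int.floordiv_lt_iff_lt_mul (by omega)).mpr (by omega)
    omega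

-- the `for ch in b` loop with its early `return False`
def matchLoop (pos : PySem.Dict Char (List Int)) : List Char → Int → Bool
  | [], _ => true
  | ch :: bs, cur =>
    let lst := pos.getD ch []
    let lo := bsearch lst cur 0 (PySem.List.len lst)
    if lo == PySem.List.len lst then false
    else matchLoop pos bs (PySem.List.pyGetD lst lo 0 + 1)

def issubstr_alt (a : String) (b : String) (removed : List Int) : Bool :=
  let st := PySem.Set.ofList removed
  let f := (PySem.List.enumerate a.toList).filterMap
    (fun ic => if st.contains ic.1 then none else some ic.2)
  matchLoop (buildPos f) b.toList 0

-- ===== PRECONDITION & SPEC =====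
def Spec_issubstr (a : String) (b : String) (removed : List Int) (out : Bool) : Prop := out = issubstr_alt a b removed
instance (a : String) (b : String) (removed : List Int) (out : Bool) : Decidable (Spec_issubstr a b removed out) := by unfold Spec_issubstr; infer_instance

-- ===== CLAIM (what is proved, stated in full; the proofs are below) =====
def Claim_equal_issubstr : Prop := ∀ (a : String) (b : String) (removed : List Int), Dom_issubstr a b removed → Spec_issubstr a b removed (issubstr a b removed)

-- ===== LEMMAS AND PROOFS =====

-- ---- reference subsequence check (proof-side only): greedy consume ----
def altFind (ch : Char) : List Char → Option (List Char)
  | [] => none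
  | c :: cs => if c == ch then some cs else altFind ch cs

def altAll : List Char → List Char → Bool
  | [], _ => true
  | ch :: bs, it =>
    match altFind ch it with
    | none => false
    | some rest => altAll bs rest

-- ---- A-side: fuel-free versions and reduction to altAll over the kept chars ----
theorem skipA_filt_mono (p : Int) : ∀ l : List Int,
    (l.filter (fun x => decide (p + 1 ≤ x))).length ≤ (l.filter (fun x => decide (p ≤ x))).length := by
  intro l
  induction l with
  | nil => simp
  | cons y u ih =>
    rw [List.filter_cons, List.filter_cons]
    by_cases h1 : p + 1 ≤ y
    · rw [if_pos (by simpa using h1), if_pos (by simp; omega)]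
      simpa using ih
    · rw [if_neg (by simpa using h1)]
      by_cases h2 : p ≤ y
      · rw [if_pos (by simpa using h2)]
        exact le_trans ih (Nat.le_succ _)
      · rw [if_neg (by simpa using h2)]
        exact ih

theorem skipA_measure (st : List Int) (p : Int) (h : st.contains p = true) :
    (st.filter (fun x => decide (p + 1 ≤ x))).length < (st.filter (fun x => decide (p ≤ x))).length := by
  induction st with
  | nil => simp at h
  | cons y u ih =>
    simp only [List.contains_cons, Bool.or_eq_true, beq_iff_eq] at h
    rw [List.filter_cons, List.filter_cons]
    rcases h with h | h
    · subst h
      rw [if_neg (by simp), if_pos (by simp)]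
      exact Nat.lt_succ_of_le (skipA_filt_mono p u)
    · have ihu := ih (by simpa using h)
      by_cases h1 : p + 1 ≤ y
      · rw [if_pos (by simpa using h1), if_pos (by simp; omega)]
        simpa using ihu
      · rw [if_neg (by simpa using h1)]
        by_cases h2 : p ≤ y
        · rw [if_pos (by simpa using h2)]
          exact Nat.lt_succ_of_lt ihu
        · rw [if_neg (by simpa using h2)]
          exact ihu

def skipW (st : List Int) (p : Int) : Int :=
  if h : st.contains p then skipW st (p + 1) else p
termination_by (st.filter (fun x => decide (p ≤ x))).length
decreasing_by exact skipA_measure st p h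

theorem skipA_eq_skipW (st : List Int) :
    ∀ (fuel : Nat) (p : Int), (st.filter (fun x => decide (p ≤ x))).length ≤ fuel →
      skipA st fuel p = skipW st p := by
  intro fuel
  induction fuel with
  | zero =>
    intro p hf
    have hnm : p ∉ st := by
      intro hmem
      have hin : p ∈ st.filter (fun x => decide (p ≤ x)) :=
        List.mem_filter.mpr ⟨hmem, by simp⟩
      rw [List.eq_nil_of_length_eq_zero (Nat.le_zero.mp hf)] at hin
      simp at hin
    rw [skipA, skipW]
    simp [hnm]
  | succ fuel ih =>
    intro p hf
    by_cases hc : st.contains p = true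
    · have hm : p ∈ st := by simpa using hc
      rw [skipA, skipW]
      simp only [hc, if_true, dite_true]
      exact ih (p + 1) (by have := skipA_measure st p hc; omega)
    · have hm : p ∉ st := by simpa using hc
      rw [skipA, skipW]
      simp [hm]

theorem skipW_ge (st : List Int) (p : Int) : p ≤ skipW st p := by
  induction p using skipW.induct (st := st) with
  | case1 p h ih => rw [skipW]; simp only [h, dite_true]; omega
  | case2 p h =>
    have h' : p ∉ st := by simpa using h
    rw [skipW]; simp [h']

theorem skipW_not_mem (st : List Int) (p : Int) : st.contains (skipW st p) = false := by
  induction p using skipW.induct (st := st) with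
  | case1 p h ih =>
    have h' : p ∈ st := by simpa using h
    rw [skipW]; simpa [h'] using ih
  | case2 p h =>
    have h' : p ∉ st := by simpa using h
    rw [skipW]; simpa [h'] using h

def loopW (a b : String) (st : List Int) (n m : Int) (p q : Int) : Bool :=
  if p < n ∧ q < m then
    let p' := skipW st p
    if p' ≥ n then decide (q = m)
    else if PySem.Str.pyGet? a p' == PySem.Str.pyGet? b q then
      loopW a b st n m (p' + 1) (q + 1)
    else
      loopW a b st n m (p' + 1) q
  else decide (q = m)
termination_by (n - p).toNat
decreasing_by
  · have := skipW_ge st p; omega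
  · have := skipW_ge st p; omega

theorem loopA_eq_loopW (a b : String) (st : List Int) (n m : Int) :
    ∀ (fuel : Nat) (p q : Int), (n - p).toNat < fuel →
      loopA a b st n m fuel p q = loopW a b st n m p q := by
  intro fuel
  induction fuel with
  | zero => intro p q hf; omega
  | succ fuel ih =>
    intro p q hf
    rw [loopA, loopW]
    by_cases hc : p < n ∧ q < m
    · rw [if_pos hc, if_pos hc]
      have hskip : skipA st st.length p = skipW st p :=
        skipA_eq_skipW st st.length p (List.length_filter_le _ _)
      simp only [hskip]
      have hge : p ≤ skipW st p := skipW_ge st p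
      generalize hgen : skipW st p = p' at hge ⊢
      by_cases hbig : p' ≥ n
      · rw [if_pos hbig, if_pos hbig]
      · rw [if_neg hbig, if_neg hbig]
        by_cases heq : (PySem.Str.pyGet? a p' == PySem.Str.pyGet? b q) = true
        · rw [if_pos heq, if_pos heq]
          exact ih (p' + 1) (q + 1) (by omega)
        · rw [if_neg heq, if_neg heq]
          exact ih (p' + 1) q (by omega)
    · rw [if_neg hc, if_neg hc]

-- the kept characters of a from index p on
def kf (aL : List Char) (st : List Int) (p : Nat) : List Char :=
  ((PySem.List.enumerate aL).drop p).filterMap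
    (fun ic => if st.contains ic.1 then none else some ic.2)

theorem kf_ge (aL : List Char) (st : List Int) (p : Nat) (h : aL.length ≤ p) :
    kf aL st p = [] := by
  unfold kf
  rw [List.drop_eq_nil_of_le (by simpa [PySem.List.length_enumerate] using h)]
  rfl

theorem enum_drop (aL : List Char) (p : Nat) (h : p < aL.length) :
    (PySem.List.enumerate aL).drop p
      = ((p : Int), aL[p]) :: (PySem.List.enumerate aL).drop (p + 1) := by
  rw [List.drop_eq_getElem_cons (by simpa [PySem.List.length_enumerate] using h)]
  congr 1
  simp [PySem.List.getElem_enumerate]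

theorem kf_mem (aL : List Char) (st : List Int) (p : Nat) (hp : p < aL.length)
    (h : st.contains (p : Int) = true) : kf aL st p = kf aL st (p + 1) := by
  unfold kf
  rw [enum_drop aL p hp, List.filterMap_cons]
  have hm : ((p : Int) ∈ st) := by simpa using h
  simp [hm]

theorem kf_not_mem (aL : List Char) (st : List Int) (p : Nat) (hp : p < aL.length)
    (h : st.contains (p : Int) = false) :
    kf aL st p = aL[p] :: kf aL st (p + 1) := by
  unfold kf
  rw [enum_drop aL p hp, List.filterMap_cons]
  have hm : ((p : Int) ∉ st) := by simpa using h
  simp [hm]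

theorem kf_skipW (aL : List Char) (st : List Int) (p : Int) (h0 : 0 ≤ p) :
    kf aL st p.toNat = kf aL st (skipW st p).toNat := by
  induction p using skipW.induct (st := st) with
  | case1 p h ih =>
    rw [skipW]; simp only [h, dite_true]
    have h0' : 0 ≤ p + 1 := by omega
    rw [← ih h0']
    by_cases hp : p.toNat < aL.length
    · have hcast : ((p.toNat : Int)) = p := Int.toNat_of_nonneg h0
      rw [kf_mem aL st p.toNat hp (by rwa [hcast])]
      congr 1
      omega
    · rw [kf_ge aL st p.toNat (by omega), kf_ge aL st (p + 1).toNat (by omega)]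
  | case2 p h =>
    have h' : p ∉ st := by simpa using h
    rw [skipW]; simp [h']

theorem altAll_skip (bs : List Char) (c : Char) (t : List Char) (d : Char) (rest : List Char)
    (hbs : bs = d :: rest) (hne : (c == d) = false) :
    altAll bs (c :: t) = altAll bs t := by
  subst hbs
  simp [altAll, altFind, hne]

theorem altAll_nil_it (bs : List Char) : altAll bs [] = decide (bs = []) := by
  cases bs <;> simp [altAll, altFind]

theorem loop_eq (a b : String) (st : List Int) :
    ∀ (k : Nat) (p q : Int), ((a.toList.length : Int) - p).toNat ≤ k → 0 ≤ p → 0 ≤ q →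
      q ≤ (b.toList.length : Int) →
      loopW a b st (a.toList.length : Int) (b.toList.length : Int) p q
        = altAll (b.toList.drop q.toNat) (kf a.toList st p.toNat) := by
  intro k
  induction k with
  | zero =>
    intro p q hk h0p h0q hqm
    rw [loopW]
    have hpn : (a.toList.length : Int) ≤ p := by omega
    have hcond : ¬ (p < (a.toList.length : Int) ∧ q < (b.toList.length : Int)) := by omega
    rw [if_neg hcond, kf_ge a.toList st p.toNat (by omega), altAll_nil_it]
    by_cases hq : q = (b.toList.length : Int)
    · rw [decide_eq_true hq, decide_eq_true (by rw [List.drop_eq_nil_of_le (by omega)])]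
    · rw [decide_eq_false hq,
          decide_eq_false (by simp only [List.drop_eq_nil_iff]; omega)]
  | succ k ih =>
    intro p q hk h0p h0q hqm
    rw [loopW]
    by_cases hc : p < (a.toList.length : Int) ∧ q < (b.toList.length : Int)
    · rw [if_pos hc]
      have hp'ge : p ≤ skipW st p := skipW_ge st p
      have hnm0 : st.contains (skipW st p) = false := skipW_not_mem st p
      have hkf : kf a.toList st p.toNat = kf a.toList st (skipW st p).toNat :=
        kf_skipW a.toList st p h0p
      generalize hgen : skipW st p = p' at hp'ge hnm0 hkf ⊢
      by_cases hbig : p' ≥ (a.toList.length : Int)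
      · rw [if_pos hbig, hkf, kf_ge a.toList st p'.toNat (by omega), altAll_nil_it]
        have hq : ¬ q = (b.toList.length : Int) := by omega
        rw [decide_eq_false hq,
            decide_eq_false (by simp only [List.drop_eq_nil_iff]; omega)]
      · rw [if_neg hbig]
        have hp'n : p'.toNat < a.toList.length := by omega
        have hcast : ((p'.toNat : Int)) = p' := Int.toNat_of_nonneg (by omega)
        have hcastq : ((q.toNat : Int)) = q := Int.toNat_of_nonneg h0q
        have hnm : st.contains ((p'.toNat : Int)) = false := by rwa [hcast]
        have hkfc : kf a.toList st p'.toNat = a.toList[p'.toNat] :: kf a.toList st (p'.toNat + 1) :=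
          kf_not_mem a.toList st p'.toNat hp'n hnm
        have hqn : q.toNat < b.toList.length := by omega
        have hm1 : ((a.toList.length : Int) - (p' + 1)).toNat ≤ k := by omega
        have hm2 : 0 ≤ p' + 1 := by omega
        have hm3 : 0 ≤ q + 1 := by omega
        have hm4 : q + 1 ≤ (b.toList.length : Int) := by omega
        have hbdrop : b.toList.drop q.toNat = b.toList[q.toNat] :: b.toList.drop (q.toNat + 1) :=
          List.drop_eq_getElem_cons hqn
        have hga0 : PySem.Str.pyGet? a ((p'.toNat : Nat) : Int) = some (a.toList[p'.toNat]) := by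
          rw [PySem.Str.pyGet?_natCast, List.getElem?_eq_getElem hp'n]
        have hga : PySem.Str.pyGet? a p' = some (a.toList[p'.toNat]) := by
          rwa [hcast] at hga0
        have hgb0 : PySem.Str.pyGet? b ((q.toNat : Nat) : Int) = some (b.toList[q.toNat]) := by
          rw [PySem.Str.pyGet?_natCast, List.getElem?_eq_getElem hqn]
        have hgb : PySem.Str.pyGet? b q = some (b.toList[q.toNat]) := by
          rwa [hcastq] at hgb0
        rw [hga, hgb, hkf, hkfc, hbdrop]
        by_cases heq : (a.toList[p'.toNat] == b.toList[q.toNat]) = true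
        · rw [if_pos (by simpa using heq)]
          rw [ih (p' + 1) (q + 1) hm1 hm2 hm3 hm4]
          have e1 : (p' + 1).toNat = p'.toNat + 1 := by omega
          have e2 : (q + 1).toNat = q.toNat + 1 := by omega
          rw [e1, e2]
          simp [altAll, altFind, heq]
        · have heq' : (a.toList[p'.toNat] == b.toList[q.toNat]) = false := by
            simpa using heq
          rw [if_neg (by simpa using heq)]
          rw [ih (p' + 1) q hm1 hm2 h0q hqm]
          have e1 : (p' + 1).toNat = p'.toNat + 1 := by omega
          rw [e1, ← hbdrop]
          rw [altAll_skip (b.toList.drop q.toNat) _ _ _ _ hbdrop heq']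
    · rw [if_neg hc]
      by_cases hq : q = (b.toList.length : Int)
      · rw [decide_eq_true hq, List.drop_eq_nil_of_le (by omega)]
        rfl
      · have hpn : (a.toList.length : Int) ≤ p := by omega
        rw [kf_ge a.toList st p.toNat (by omega), altAll_nil_it]
        rw [decide_eq_false hq,
            decide_eq_false (by simp only [List.drop_eq_nil_iff]; omega)]

-- ---- B-side: the occurrence index and the binary search ----

-- the increasing list of positions of c in f
def occ (f : List Char) (c : Char) : List Int :=
  (PySem.List.enumerate f).filterMap (fun kc => if kc.2 = c then some kc.1 else none)

theorem buildPos_fold (c : Char) :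
    ∀ (l : List (Int × Char)) (d : PySem.Dict Char (List Int)),
      (l.foldl (fun d kc => d.insert kc.2 (d.getD kc.2 [] ++ [kc.1])) d).getD c []
        = d.getD c [] ++ l.filterMap (fun kc => if kc.2 = c then some kc.1 else none) := by
  intro l
  induction l with
  | nil => intro d; simp
  | cons kc l ih =>
    intro d
    rw [List.foldl_cons, ih, List.filterMap_cons, PySem.Dict.getD_insert]
    by_cases hc : kc.2 = c
    · rw [if_pos hc.symm, if_pos hc]
      rw [hc, List.append_assoc, List.singleton_append]
    · rw [if_neg (fun h => hc h.symm), if_neg hc]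

theorem buildPos_getD (f : List Char) (c : Char) :
    (buildPos f).getD c [] = occ f c := by
  unfold buildPos occ
  rw [buildPos_fold c (PySem.List.enumerate f) PySem.Dict.empty]
  rfl

theorem mem_occ (f : List Char) (c : Char) (x : Int) :
    x ∈ occ f c ↔ ∃ (k : Nat) (h : k < f.length), x = (k : Int) ∧ f[k] = c := by
  unfold occ
  rw [List.mem_filterMap]
  constructor
  · rintro ⟨p, hp, hx⟩
    rcases (PySem.List.mem_enumerate_iff _ _ _).mp hp with ⟨k, hk, rfl⟩
    by_cases hc : f[k] = c
    · refine ⟨k, hk, ?_, hc⟩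
      simp [hc] at hx
      omega
    · simp [hc] at hx
  · rintro ⟨k, hk, rfl, hc⟩
    refine ⟨((k : Int), f[k]), ?_, ?_⟩
    · exact (PySem.List.mem_enumerate_iff _ _ _).mpr ⟨k, hk, by simp⟩
    · simp [hc]

theorem pairwise_occ (f : List Char) (c : Char) : (occ f c).Pairwise (· < ·) := by
  unfold occ
  refine List.Pairwise.filterMap _ ?_ (PySem.List.pairwise_lt_enumerate f 0)
  intro p q hpq x hx y hy
  by_cases hp : p.2 = c
  · by_cases hq : q.2 = c
    · simp [hp] at hx
      simp [hq] at hy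
      omega
    · simp [hq] at hy
  · simp [hp] at hx

theorem bsearch_spec (lst : List Int) (cur : Int) (hsort : lst.Pairwise (· ≤ ·)) :
    ∀ (n : Nat) (lo hi : Int), (hi - lo).toNat ≤ n → 0 ≤ lo → lo ≤ hi → hi ≤ (lst.length : Int) →
      (∀ (i : Nat) (h : i < lst.length), (i : Int) < lo → lst[i] < cur) →
      (∀ (i : Nat) (h : i < lst.length), hi ≤ (i : Int) → cur ≤ lst[i]) →
      0 ≤ bsearch lst cur lo hi ∧ bsearch lst cur lo hi ≤ (lst.length : Int) ∧
      (∀ (i : Nat) (h : i < lst.length), (i : Int) < bsearch lst cur lo hi → lst[i] < cur) ∧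
      (∀ (i : Nat) (h : i < lst.length), bsearch lst cur lo hi ≤ (i : Int) → cur ≤ lst[i]) := by
  have hmono : ∀ (i j : Nat) (hi' : i < lst.length) (hj : j < lst.length), i ≤ j → lst[i] ≤ lst[j] := by
    intro i j hi' hj hij
    rcases Nat.lt_or_eq_of_le hij with h | h
    · exact (List.pairwise_iff_getElem.mp hsort) i j hi' hj h
    · subst h; exact le_refl _
  intro n
  induction n with
  | zero =>
    intro lo hi hn h0 hlh hhl hlow hhigh
    have heq : lo = hi := by omega
    rw [bsearch, dif_neg (by omega)]
    exact ⟨h0, by omega, hlow, fun i h hle => hhigh i h (by omega)⟩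
  | succ n ih =>
    intro lo hi hn h0 hlh hhl hlow hhigh
    rw [bsearch]
    by_cases hlt : lo < hi
    · have hmb := PySem.Int.floordiv_two_mid_bounds (lo := lo) (hi := hi) (le_of_lt hlt)
      have hmhi : PySem.Int.floordiv (lo + hi) 2 < hi :=
        (PySem.Int.floordiv_lt_iff_lt_mul (by omega)).mpr (by omega)
      simp only [hlt, dite_true]
      set mid := PySem.Int.floordiv (lo + hi) 2 with hmid
      have hmlen : mid.toNat < lst.length := by omega
      have hget : PySem.List.pyGetD lst mid 0 = lst[mid.toNat] :=
        PySem.List.pyGetD_eq_getElem lst 0 (by omega) (by omega)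
      rw [hget]
      by_cases hcmp : lst[mid.toNat] < cur
      · rw [if_pos hcmp]
        refine ih (mid + 1) hi (by omega) (by omega) (by omega) hhl ?_ hhigh
        intro i h hilt
        exact lt_of_le_of_lt (hmono i mid.toNat h hmlen (by omega)) hcmp
      · rw [if_neg hcmp]
        refine ih lo mid (by omega) h0 (by omega) (by omega) hlow ?_
        intro i h hile
        exact le_trans (le_of_not_gt hcmp) (hmono mid.toNat i hmlen h (by omega))
    · rw [dif_neg hlt]
      exact ⟨h0, by omega, fun i h hle => hlow i h (by omega),
        fun i h hle => hhigh i h (by omega)⟩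

theorem altFind_none (f : List Char) (c : Char) :
    ∀ (t : Nat), (∀ e ∈ occ f c, e < (t : Int)) → altFind c (f.drop t) = none := by
  suffices H : ∀ (n t : Nat), f.length - t ≤ n → (∀ e ∈ occ f c, e < (t : Int)) →
      altFind c (f.drop t) = none by
    intro t h; exact H f.length t (by omega) h
  intro n
  induction n with
  | zero =>
    intro t hn h
    rw [List.drop_eq_nil_of_le (by omega)]
    rfl
  | succ n ih =>
    intro t hn h
    by_cases ht : t < f.length
    · rw [List.drop_eq_getElem_cons ht]
      have hne : (f[t] == c) = false := by
        by_contra hb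
        have hc : f[t] = c := by simpa using (Bool.not_eq_false _).mp hb
        have hmem : ((t : Nat) : Int) ∈ occ f c := (mem_occ f c _).mpr ⟨t, ht, rfl, hc⟩
        have := h _ hmem
        omega
      rw [altFind, if_neg (by simpa using hne)]
      exact ih (t + 1) (by omega) (fun e he => by have := h e he; omega)
    · rw [List.drop_eq_nil_of_le (by omega)]
      rfl

theorem altFind_first (f : List Char) (c : Char) :
    ∀ (t : Nat) (e : Int), e ∈ occ f c → (t : Int) ≤ e →
      (∀ e' ∈ occ f c, (t : Int) ≤ e' → e ≤ e') →
      altFind c (f.drop t) = some (f.drop (e.toNat + 1)) := by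
  suffices H : ∀ (n : Nat) (t : Nat) (e : Int), f.length - t ≤ n → e ∈ occ f c → (t : Int) ≤ e →
      (∀ e' ∈ occ f c, (t : Int) ≤ e' → e ≤ e') →
      altFind c (f.drop t) = some (f.drop (e.toNat + 1)) by
    intro t e he hte hmin; exact H f.length t e (by omega) he hte hmin
  intro n
  induction n with
  | zero =>
    intro t e hn he hte hmin
    rcases (mem_occ f c e).mp he with ⟨k, hk, rfl, _⟩
    omega
  | succ n ih =>
    intro t e hn he hte hmin
    by_cases ht : t < f.length
    · rw [List.drop_eq_getElem_cons ht]
      by_cases hc : f[t] = c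
      · have hmem : ((t : Nat) : Int) ∈ occ f c := (mem_occ f c _).mpr ⟨t, ht, rfl, hc⟩
        have het : e = (t : Int) := le_antisymm (hmin _ hmem (le_refl _)) hte
        rw [altFind, if_pos (by simpa using hc)]
        rw [het]
        simp
      · have hne : e ≠ (t : Int) := by
          intro hb
          rcases (mem_occ f c e).mp he with ⟨k, hk, hek, hkc⟩
          have : k = t := by omega
          exact hc (this ▸ hkc)
        rw [altFind, if_neg (by simpa using hc)]
        exact ih (t + 1) e (by omega) he (by omega)
          (fun e' he' hte' => hmin e' he' (by omega))
    · rcases (mem_occ f c e).mp he with ⟨k, hk, rfl, _⟩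
      omega

theorem matchLoop_eq (f : List Char) :
    ∀ (bs : List Char) (cur : Int), 0 ≤ cur →
      matchLoop (buildPos f) bs cur = altAll bs (f.drop cur.toNat) := by
  intro bs
  induction bs with
  | nil => intro cur _; rfl
  | cons ch bs ih =>
    intro cur h0
    have hsort : (occ f ch).Pairwise (· ≤ ·) :=
      (pairwise_occ f ch).imp (fun h => le_of_lt h)
    obtain ⟨hr0, hrlen, hlow, hhigh⟩ :=
      bsearch_spec (occ f ch) cur hsort ((occ f ch).length + 1) 0 ((occ f ch).length : Int)
        (by omega) (by omega) (by omega) (by omega)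
        (fun i h hi0 => absurd hi0 (by omega))
        (fun i h hlen => absurd hlen (by omega))
    rw [matchLoop]
    simp only [buildPos_getD f ch, PySem.List.len_eq]
    set r := bsearch (occ f ch) cur 0 ((occ f ch).length : Int) with hr
    have hcast : ((cur.toNat : Nat) : Int) = cur := Int.toNat_of_nonneg h0
    by_cases hre : r = ((occ f ch).length : Int)
    · rw [if_pos (by simpa using hre)]
      have hfind : altFind ch (f.drop cur.toNat) = none := by
        apply altFind_none
        intro e he
        rcases List.mem_iff_getElem.mp he with ⟨j, hj, rfl⟩
        rw [hcast]
        exact hlow j hj (by omega)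
      rw [altAll, hfind]
    · rw [if_neg (by simpa using hre)]
      have hrn : r.toNat < (occ f ch).length := by omega
      have hget : PySem.List.pyGetD (occ f ch) r 0 = (occ f ch)[r.toNat] :=
        PySem.List.pyGetD_eq_getElem (occ f ch) 0 (by omega) (by omega)
      set e := (occ f ch)[r.toNat] with hedef
      have he : e ∈ occ f ch := List.getElem_mem hrn
      have hcure : cur ≤ e := hhigh r.toNat hrn (by omega)
      have he0 : 0 ≤ e := le_trans h0 hcure
      have hmin : ∀ e' ∈ occ f ch, ((cur.toNat : Nat) : Int) ≤ e' → e ≤ e' := by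
        intro e' he' _
        rcases List.mem_iff_getElem.mp he' with ⟨j, hj, rfl⟩
        by_cases hjr : j < r.toNat
        · have := hlow j hj (by omega)
          have hcurj : cur ≤ (occ f ch)[j] := hhigh j hj ?_
          · omega
          · exact absurd this (by omega)
        · rcases Nat.lt_or_eq_of_le (Nat.le_of_not_lt hjr) with hlt | heq
          · exact (List.pairwise_iff_getElem.mp hsort) r.toNat j hrn hj hlt
          · subst heq
            exact le_of_eq hedef
      have hfind : altFind ch (f.drop cur.toNat) = some (f.drop (e.toNat + 1)) :=
        altFind_first f ch cur.toNat e he (by omega) hmin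
      rw [altAll, hfind, hget, ih (e + 1) (by omega)]
      have : (e + 1).toNat = e.toNat + 1 := by omega
      rw [this]

-- ===== VERDICT (by name: the statement is the Claim_ definition above) =====
theorem issubstr_spec : Claim_equal_issubstr := by
  intro a b removed _
  unfold Spec_issubstr issubstr issubstr_alt
  simp only [PySem.Str.len_eq]
  rw [loopA_eq_loopW a b (PySem.Set.ofList removed) (a.toList.length : Int)
      (b.toList.length : Int) (((a.toList.length : Int)).toNat + 1) 0 0 (by omega)]
  rw [loop_eq a b (PySem.Set.ofList removed)
      (((a.toList.length : Int)) - 0).toNat 0 0 (le_refl _) (le_refl _) (le_refl _)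
      (by positivity)]
  rw [matchLoop_eq _ b.toList 0 (le_refl _)]
  simp [kf]
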